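/-
  jsmn IS CORRECT ON VALID JSON, COUNTING MODE (`tokens == NULL`): jsmn_parse returns the number of tokens the text needs.

  In counting mode nothing is allocated (`toknext` stays 0), `toksuper` stays -1 (`:` sets it to `toknext - 1`), brackets are not matched:
  only `count` moves. `parse_layout_count`: on a JSON text the result is `l.count`, the parser ends at the end of the text.
  The condition in JSMN_STRICT is the same as in token mode (a top-level primitive must be followed by whitespace); its converse
  is `parse_strict_bare_primitive` (Json/Jsmn/Correct.lean), which covers both modes.
-/
import Json.Jsmn.Correct

namespace Jsmn
open Json

section
variable {cfg : Config} {js : List UInt8} {n : Nat}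

/-- The state of the loop in counting mode, from a fresh parser: position and count. -/
def cstate (pos : Nat) (c : Int) : St := ⟨⟨pos, 0, -1⟩, none, c⟩

theorem string_trip_count (hjs : js.length < 2147483648) {b : List UInt8} (hb : IsStringBody b) {pos : Nat} {c : Int} {rest : List UInt8}
    (hd : js.drop pos = 0x22 :: b ++ 0x22 :: rest) (hc0 : 0 ≤ c) (hc1 : c + 1 < 2147483648) :
    Reaches cfg js n (cstate pos c) (cstate (pos + (1 + b.length + 1)) (c + 1)) := by
  have hd' : js.drop pos = 0x22 :: (b ++ 0x22 :: rest) := by simpa using hd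
  have hlt := lt_of_drop hd'
  have hq := lt_of_drop (drop_advance (drop_succ hd'))
  have t := Reaches.trip (cfg := cfg) (n := n) (s := cstate pos c) (s' := cstate (pos + 1 + b.length) (c + 1))
    hd' (by decide) ?_ (by simp [cstate]; omega) (by simp [cstate]; omega)
  · have e : pos + (1 + b.length + 1) = pos + 1 + b.length + 1 := by omega
    rw [e]; exact t
  · intro fuel hf
    have hs := strScan_body js (by omega) hb fuel (pos + 1) rest (drop_succ hd') (by simp [cstate] at hf; omega)
    have h1 : ((0x22 : UInt8) == 0x7b || (0x22 : UInt8) == 0x5b) = false := by decide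
    have h2 : ((0x22 : UInt8) == 0x7d || (0x22 : UInt8) == 0x5d) = false := by decide
    simp only [body, h1, h2, Bool.false_eq_true, if_false, beq_self_eq_true, if_true, parseString, cstate]
    rw [u32_succ (by omega), hs]
    simp [bumpSuper, i32_of_range (by omega : -2147483648 ≤ c + 1) hc1]

theorem prim_trip_count (hjs : js.length < 2147483648) {t : List UInt8} (ht : IsPrimText t) {pos : Nat} {c : Int} {rest : List UInt8}
    (hd : js.drop pos = t ++ rest) (hstop : StopAfter cfg rest) (hc0 : 0 ≤ c) (hc1 : c + 1 < 2147483648) :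
    Reaches cfg js n (cstate pos c) (cstate (pos + t.length) (c + 1)) := by
  obtain ⟨c0, t', rfl, hp0, hall⟩ := ht
  have hd' : js.drop pos = c0 :: (t' ++ rest) := by simpa using hd
  have hlt := lt_of_drop hd'
  have hc : primChar c0 = true := hall c0 (by simp)
  have hq : pos + (c0 :: t').length ≤ js.length := by
    have := congrArg List.length hd
    simp at this; simp; omega
  have t := Reaches.trip (cfg := cfg) (n := n) (s := cstate pos c) (s' := cstate (pos + t'.length) (c + 1))
    hd' (primChar_ne_zero hc) ?_ (by simp [cstate]) (by simp [cstate] at hq ⊢; omega)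
  · have e : pos + (c0 :: t').length = pos + t'.length + 1 := by simp; omega
    rw [e]; exact t
  · intro fuel hf
    obtain ⟨h1, h2, h3, h4, h5, h6⟩ := primChar_not_special hc
    have hprim : primitiveCase cfg js fuel n (cstate pos c) = some (.next (cstate (pos + t'.length) (c + 1))) := by
      simp only [primitiveCase, parsePrimitive, cstate]
      rcases hstop with ⟨rfl, hs⟩ | ⟨d, r, rfl, hs⟩
      · rw [primScan_eoi cfg js (by omega) (c0 :: t') fuel pos (by simpa using hd) hall (by simp [cstate] at hq hf ⊢; omega)]
        simp only [hs, Bool.false_eq_true, if_false]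
        rw [u32_pred (by simp; omega) (by omega)]
        simp [bumpSuper, i32_of_range (by omega : -2147483648 ≤ c + 1) hc1]
      · rw [primScan_found cfg js (by omega) (c0 :: t') fuel pos d r hd hall hs (by simp [cstate] at hq hf ⊢; omega)]
        simp only []
        rw [u32_pred (by simp; omega) (by omega)]
        simp [bumpSuper, i32_of_range (by omega : -2147483648 ≤ c + 1) hc1]
    simp only [body, h1, h2, h3, h4, h5, h6, Bool.false_eq_true, if_false, hp0, if_true, hprim]
    cases cfg.strict <;> simp [cstate]

/-- `[` or `{` in counting mode: `count++`. -/
theorem open_trip_count (hjs : js.length < 2147483648) {d : UInt8} (hd0 : d = 0x7b ∨ d = 0x5b) {pos : Nat} {c : Int} {rest : List UInt8}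
    (hd : js.drop pos = d :: rest) (hc0 : 0 ≤ c) (hc1 : c + 1 < 2147483648) :
    Reaches cfg js n (cstate pos c) (cstate (pos + 1) (c + 1)) := by
  have hlt := lt_of_drop hd
  refine Reaches.trip (cfg := cfg) (n := n) (s := cstate pos c) (s' := cstate pos (c + 1)) hd (by rcases hd0 with rfl | rfl <;> decide) ?_
    (Nat.le_refl _) (by simp [cstate]; omega)
  intro fuel _
  have h1 : (d == 0x7b || d == 0x5b) = true := by rcases hd0 with rfl | rfl <;> decide
  simp [body, h1, openBracket, cstate, i32_of_range (by omega : -2147483648 ≤ c + 1) hc1]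

/-- `]` `}` `:` `,` in counting mode: nothing. -/
theorem other_trip_count (hjs : js.length < 2147483648) {d : UInt8} (hd0 : d = 0x7d ∨ d = 0x5d ∨ d = 0x3a ∨ d = 0x2c) {pos : Nat} {c : Int}
    {rest : List UInt8} (hd : js.drop pos = d :: rest) :
    Reaches cfg js n (cstate pos c) (cstate (pos + 1) c) := by
  have hlt := lt_of_drop hd
  refine Reaches.trip (cfg := cfg) (n := n) (s := cstate pos c) (s' := cstate pos c) hd (by rcases hd0 with rfl | rfl | rfl | rfl <;> decide) ?_
    (Nat.le_refl _) (by simp [cstate]; omega)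
  intro fuel _
  rcases hd0 with rfl | rfl | rfl | rfl <;> simp [body, closeBracket, comma, cstate] <;> rfl

set_option linter.unusedSectionVars false
variable (hjs : js.length < 2147483648)
include hjs

mutual
theorem value_count : (l : Layout) → l.WellFormed → ∀ (pos : Nat) (c : Int) (rest : List UInt8),
    js.drop pos = l.text ++ rest → (l.isPrimitive = true → StopAfter cfg rest) → 0 ≤ c → c ≤ pos →
    Reaches cfg js n (cstate pos c) (cstate (pos + l.text.length) (c + l.count))
  | .null, _ => fun pos c rest hd hstop h0 h1 =>
    prim_trip_count hjs isPrimText_null hd (hstop rfl) h0 (by have := lt_of_drop (show js.drop pos = _ :: _ from hd); omega)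
  | .true, _ => fun pos c rest hd hstop h0 h1 =>
    prim_trip_count hjs isPrimText_true hd (hstop rfl) h0 (by have := lt_of_drop (show js.drop pos = _ :: _ from hd); omega)
  | .false, _ => fun pos c rest hd hstop h0 h1 =>
    prim_trip_count hjs isPrimText_false hd (hstop rfl) h0 (by have := lt_of_drop (show js.drop pos = _ :: _ from hd); omega)
  | .number t, wf => fun pos c rest hd hstop h0 h1 => by
    obtain ⟨c0, t', rfl, hx⟩ := IsNumber.isPrimText wf
    exact prim_trip_count hjs (IsNumber.isPrimText wf) hd (hstop rfl) h0 (by have := lt_of_drop (show js.drop pos = _ :: _ from hd); omega)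
  | .string b, wf => fun pos c rest hd _ h0 h1 => by
    have hd' : js.drop pos = 0x22 :: b ++ 0x22 :: rest := by simpa [Layout.text] using hd
    have := string_trip_count (cfg := cfg) (n := n) hjs wf hd' h0 (by have := lt_of_drop (show js.drop pos = _ :: _ from hd'); omega)
    exact this.cast (by simp [Layout.text, Layout.count, cstate]; omega)
  | .array ws items, wf => fun pos c rest hd _ h0 h1 => by
    obtain ⟨hws, hitems⟩ := wf
    have hd0 : js.drop pos = 0x5b :: (ws ++ (items.text ++ 0x5d :: rest)) := by simpa [Layout.text] using hd
    have hlt := lt_of_drop hd0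
    have T1 := open_trip_count (cfg := cfg) (n := n) hjs (Or.inr rfl) hd0 h0 (by omega)
    have hd1 := drop_succ hd0
    have T2 := skip_ws (cfg := cfg) (n := n) (by omega) 0 (-1) none (c + 1) ws (pos + 1) _ hws hd1
    have hd2 := drop_advance hd1
    have T3 := items_count items hitems (pos + 1 + ws.length) (c + 1) rest hd2 (by omega) (by omega)
    have hd3 := drop_advance hd2
    have T4 := other_trip_count (cfg := cfg) (n := n) (c := c + 1 + items.count) hjs (Or.inr (Or.inl rfl)) hd3
    exact (T1.trans (T2.trans (T3.trans T4))).cast (by simp [Layout.text, Layout.count, cstate]; omega)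
  | .object ws members, wf => fun pos c rest hd _ h0 h1 => by
    obtain ⟨hws, hmembers⟩ := wf
    have hd0 : js.drop pos = 0x7b :: (ws ++ (members.text ++ 0x7d :: rest)) := by simpa [Layout.text] using hd
    have hlt := lt_of_drop hd0
    have T1 := open_trip_count (cfg := cfg) (n := n) hjs (Or.inl rfl) hd0 h0 (by omega)
    have hd1 := drop_succ hd0
    have T2 := skip_ws (cfg := cfg) (n := n) (by omega) 0 (-1) none (c + 1) ws (pos + 1) _ hws hd1
    have hd2 := drop_advance hd1
    have T3 := members_count members hmembers (pos + 1 + ws.length) (c + 1) rest hd2 (by omega) (by omega)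
    have hd3 := drop_advance hd2
    have T4 := other_trip_count (cfg := cfg) (n := n) (c := c + 1 + members.count) hjs (Or.inl rfl) hd3
    exact (T1.trans (T2.trans (T3.trans T4))).cast (by simp [Layout.text, Layout.count, cstate]; omega)

theorem items_count : (is : Items) → is.WellFormed → ∀ (pos : Nat) (c : Int) (rest : List UInt8),
    js.drop pos = is.text ++ 0x5d :: rest → 0 ≤ c → c ≤ pos →
    Reaches cfg js n (cstate pos c) (cstate (pos + is.text.length) (c + is.count))
  | .nil, _ => fun pos c rest _ _ _ => (Reaches.refl _ _ _ _).cast (by simp [Items.text, Items.count, cstate])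
  | .cons pre item post tail, wf => fun pos c rest hd h0 h1 => by
    obtain ⟨hpre, hitem, hpost, htail⟩ := wf
    have IH := items_count tail htail
    have hd0 : js.drop pos = pre ++ (item.text ++ (post ++ (tail.tail ++ 0x5d :: rest))) := by simpa [Items.text] using hd
    have T1 := skip_ws (cfg := cfg) (n := n) (by omega) 0 (-1) none c pre pos _ hpre hd0
    have hd1 := drop_advance hd0
    have hstop : StopAfter cfg (post ++ (tail.tail ++ 0x5d :: rest)) := by
      cases tail with
      | nil => exact stopAfter_post cfg hpost (primStop_rbracket cfg) rest
      | cons _ _ _ _ => exact stopAfter_post cfg hpost (primStop_comma cfg) _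
    have T2 := value_count item hitem (pos + pre.length) c _ hd1 (fun _ => hstop) h0 (by omega)
    have hd2 := drop_advance hd1
    have T3 := skip_ws (cfg := cfg) (n := n) (by omega) 0 (-1) none (c + item.count) post _ _ hpost hd2
    have hd3 := drop_advance hd2
    have hic := Layout.count_le_text item hitem
    cases tail with
    | nil => exact ((T1.trans T2).trans T3).cast (by simp [Items.text, Items.tail, Items.count, cstate]; omega)
    | cons pre2 item2 post2 tail2 =>
      have hd3' : js.drop (pos + pre.length + item.text.length + post.length) =
          0x2c :: ((Items.cons pre2 item2 post2 tail2).text ++ 0x5d :: rest) := by simpa [Items.tail, Items.text] using hd3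
      have T4 := other_trip_count (cfg := cfg) (n := n) (c := c + item.count) hjs (Or.inr (Or.inr (Or.inr rfl))) hd3'
      have T5 := IH (pos + pre.length + item.text.length + post.length + 1) (c + item.count) rest (drop_succ hd3') (by omega) (by omega)
      exact ((((T1.trans T2).trans T3).trans T4).trans T5).cast (by simp [Items.text, Items.tail, Items.count, cstate]; omega)

theorem members_count : (ms : Members) → ms.WellFormed → ∀ (pos : Nat) (c : Int) (rest : List UInt8),
    js.drop pos = ms.text ++ 0x7d :: rest → 0 ≤ c → c ≤ pos →
    Reaches cfg js n (cstate pos c) (cstate (pos + ms.text.length) (c + ms.count))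
  | .nil, _ => fun pos c rest _ _ _ => (Reaches.refl _ _ _ _).cast (by simp [Members.text, Members.count, cstate])
  | .cons pre key mid pre' val post tail, wf => fun pos c rest hd h0 h1 => by
    obtain ⟨hpre, hkey, hmid, hpre', hval, hpost, htail⟩ := wf
    have IH := members_count tail htail
    have hd0 : js.drop pos = pre ++ (0x22 :: (key ++ 0x22 :: (mid ++ 0x3a :: (pre' ++ (val.text ++ (post ++ (tail.tail ++ 0x7d :: rest))))))) := by
      simpa [Members.text] using hd
    have T1 := skip_ws (cfg := cfg) (n := n) (by omega) 0 (-1) none c pre pos _ hpre hd0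
    have hd1 := drop_advance hd0
    have hlt1 := lt_of_drop hd1
    have T2 := string_trip_count (cfg := cfg) (n := n) hjs hkey (show js.drop (pos + pre.length) = 0x22 :: key ++ 0x22 :: _ from hd1) h0 (by omega)
    rw [show pos + pre.length + (1 + key.length + 1) = pos + pre.length + 1 + key.length + 1 by omega] at T2
    have hd2 : js.drop (pos + pre.length + 1 + key.length + 1) = mid ++ 0x3a :: (pre' ++ (val.text ++ (post ++ (tail.tail ++ 0x7d :: rest)))) :=
      drop_succ (drop_advance (drop_succ hd1))
    have T3 := skip_ws (cfg := cfg) (n := n) (by omega) 0 (-1) none (c + 1) mid _ _ hmid hd2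
    have hd3 := drop_advance hd2
    have T4 := other_trip_count (cfg := cfg) (n := n) (c := c + 1) hjs (Or.inr (Or.inr (Or.inl rfl))) hd3
    have hd4 := drop_succ hd3
    have T5 := skip_ws (cfg := cfg) (n := n) (by omega) 0 (-1) none (c + 1) pre' _ _ hpre' hd4
    have hd5 := drop_advance hd4
    have hstop : StopAfter cfg (post ++ (tail.tail ++ 0x7d :: rest)) := by
      cases tail with
      | nil => exact stopAfter_post cfg hpost (primStop_rbrace cfg) rest
      | cons _ _ _ _ _ _ _ => exact stopAfter_post cfg hpost (primStop_comma cfg) _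
    have T6 := value_count val hval _ (c + 1) _ hd5 (fun _ => hstop) (by omega) (by omega)
    have hd6 := drop_advance hd5
    have T7 := skip_ws (cfg := cfg) (n := n) (by omega) 0 (-1) none (c + 1 + val.count) post _ _ hpost hd6
    have hd7 := drop_advance hd6
    have hvc := Layout.count_le_text val hval
    have Tm := (((((T1.trans T2).trans T3).trans T4).trans T5).trans T6).trans T7
    cases tail with
    | nil => exact Tm.cast (by simp [Members.text, Members.tail, Members.count, cstate]; omega)
    | cons pre2 key2 mid2 pre2' val2 post2 tail2 =>
      have hd7' : js.drop (pos + pre.length + 1 + key.length + 1 + mid.length + 1 + pre'.length + val.text.length + post.length) =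
          0x2c :: ((Members.cons pre2 key2 mid2 pre2' val2 post2 tail2).text ++ 0x7d :: rest) := by simpa [Members.tail, Members.text] using hd7
      have T8 := other_trip_count (cfg := cfg) (n := n) (c := c + 1 + val.count) hjs (Or.inr (Or.inr (Or.inr rfl))) hd7'
      have T9 := IH _ (c + 1 + val.count) rest (drop_succ hd7') (by omega) (by omega)
      exact ((Tm.trans T8).trans T9).cast (by simp [Members.text, Members.tail, Members.count, cstate]; omega)
end
end

/-- **jsmn_parse on a JSON text in counting mode** (`tokens == NULL`): the number of tokens; the parser at the end of the text, nothing
allocated. -/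
theorem parse_layout_count (cfg : Config) (w1 : List UInt8) (l : Layout) (w2 : List UInt8) (hw1 : IsWs w1) (hw2 : IsWs w2) (wf : l.WellFormed)
    (hstrict : cfg.strict = true → l.isPrimitive = true → w2 ≠ []) (hlen : (w1 ++ l.text ++ w2).length < 2147483648) (n : Nat) :
    parse cfg (w1 ++ l.text ++ w2) Parser.init none n = some ((l.count : Int), ⟨(w1 ++ l.text ++ w2).length, 0, -1⟩, none) := by
  generalize hjs : w1 ++ l.text ++ w2 = js at hlen ⊢
  have hd0 : js.drop 0 = w1 ++ (l.text ++ w2) := by simp [← hjs]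
  have T1 := skip_ws (cfg := cfg) (n := n) (by omega) 0 (-1) none 0 w1 0 _ hw1 hd0
  have hd1 := drop_advance hd0
  have T2 := value_count (cfg := cfg) (n := n) hlen l wf (0 + w1.length) 0 w2 hd1 (stopAfter_top hw2 hstrict) (Int.le_refl 0) (by omega)
  have hd2 := drop_advance hd1
  have T3 := skip_ws (cfg := cfg) (js := js) (n := n) (by omega) 0 (-1) none (0 + (l.count : Int)) w2 (0 + w1.length + l.text.length) [] hw2
    (by simpa using hd2)
  have hjl : 0 + w1.length + l.text.length + w2.length = js.length := by simp [← hjs]; omega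
  rw [hjl] at T3
  obtain ⟨fuel', hf, e⟩ := (T1.trans (T2.trans T3)) (js.length + 1) (by simp)
  have hend := loop_end (cfg := cfg) (n := n) (s := ⟨⟨js.length, 0, -1⟩, none, 0 + (l.count : Int)⟩) (by simp) (Nat.le_refl _) hf
  have hi0 : i32 (Parser.init.toknext : Int) = 0 := by decide
  simp only [parse, parseFuel, hi0]
  have e' : loop cfg js n (js.length + 1) ⟨Parser.init, none, 0⟩ = loop cfg js n fuel' ⟨⟨js.length, 0, -1⟩, none, 0 + (l.count : Int)⟩ := e
  rw [e', hend]
  simp [finish]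

end Jsmn
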